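-- pv_equiv track=rewrite | github.com/yftadyz0610/MAE-DAG | utils.py | detect_tense
-- ===== SOURCE A (Python) =====
-- def detect_tense(simple_sentence_pos_tag):
--     # Input
--     #   simple_sentence_pos_tag: POS_TAG (a list) of a SIMPLE sentence
--     # Output
--     #   past/modal/present_future
--     #
--     # it's hard to tell a future from a present.
--
--     # detecting priority: modal (MD) > past (VBD, VBN) > present_future (others)
--     # MD  Modal verb (can, could, may, must)
--     # VB  Base verb (take)
--     # VBC Future tense, conditional
--     # VBD Past tense (took)
--     # VBF Future tense
--     # VBG Gerund, present participle (taking)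
--     # VBN Past participle (taken)
--     # VBP Present tense (take)
--     # VBZ Present 3rd person singular (takes)
--
--     for tag in simple_sentence_pos_tag:
--         if tag == 'MD':
--             return 'modal'
--     for i, tag in enumerate(simple_sentence_pos_tag):
--         if tag == 'VBD':
--             return 'past'
--         if tag == 'VBN':
--             return 'past'
--     return 'present_future'
-- ===== SOURCE B (Python) =====
-- def _rank(tag):
--     if tag == 'MD':
--         return 3
--     if tag == 'VBD' or tag == 'VBN':
--         return 2
--     return 1
--
-- def detect_tense(simple_sentence_pos_tag):
--     m = 1
--     for tag in simple_sentence_pos_tag: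
--         r = _rank(tag)
--         if r > m:
--             m = r
--     return 'modal' if m == 3 else ('past' if m == 2 else 'present_future')
-- ===== Notes on version B (the rewrite author's own statement) =====
-- stated objective: alternative
-- what changed: Replaces A's two early-return scans (first for MD, then for VBD/VBN) by a single pass that folds a priority rank (MD=3, VBD/VBN=2, other=1) to its maximum and maps the max back to a label.
import Mathlib
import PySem

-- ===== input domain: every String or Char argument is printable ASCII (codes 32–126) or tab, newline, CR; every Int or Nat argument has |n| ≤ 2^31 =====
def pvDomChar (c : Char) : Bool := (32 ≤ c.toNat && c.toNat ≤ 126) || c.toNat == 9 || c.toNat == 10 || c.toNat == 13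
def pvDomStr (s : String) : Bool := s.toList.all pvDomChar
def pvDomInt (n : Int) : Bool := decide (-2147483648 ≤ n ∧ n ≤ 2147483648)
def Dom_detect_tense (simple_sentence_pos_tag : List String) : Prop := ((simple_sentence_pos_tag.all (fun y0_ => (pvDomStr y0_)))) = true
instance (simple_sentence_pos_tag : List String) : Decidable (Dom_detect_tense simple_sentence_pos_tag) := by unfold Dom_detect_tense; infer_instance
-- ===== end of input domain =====

-- ===== PORT A =====
-- loop 1: returns 'modal' at the first 'MD', else falls through
def detect_tense_loop1 : List String → Option String
  | [] => none
  | tag :: rest => if tag = "MD" then some "modal" else detect_tense_loop1 rest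

-- loop 2 (Python enumerates but never uses the index): 'past' at the first 'VBD' or 'VBN'
def detect_tense_loop2 : List String → Option String
  | [] => none
  | tag :: rest =>
      if tag = "VBD" then some "past"
      else if tag = "VBN" then some "past"
      else detect_tense_loop2 rest

def detect_tense (simple_sentence_pos_tag : List String) : String :=
  match detect_tense_loop1 simple_sentence_pos_tag with
  | some s => s
  | none =>
    match detect_tense_loop2 simple_sentence_pos_tag with
    | some s => s
    | none => "present_future"

-- ===== PORT B =====
def rankTag (tag : String) : Int :=
  if tag = "MD" then 3
  else if tag = "VBD" ∨ tag = "VBN" then 2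
  else 1

def detect_tense_alt (simple_sentence_pos_tag : List String) : String :=
  let m := simple_sentence_pos_tag.foldl (fun m tag => let r := rankTag tag; if r > m then r else m) 1
  if m = 3 then "modal" else if m = 2 then "past" else "present_future"

-- ===== PRECONDITION & SPEC =====
def Spec_detect_tense (simple_sentence_pos_tag : List String) (out : String) : Prop := out = detect_tense_alt simple_sentence_pos_tag
instance (simple_sentence_pos_tag : List String) (out : String) : Decidable (Spec_detect_tense simple_sentence_pos_tag out) := by unfold Spec_detect_tense; infer_instance

-- ===== CLAIM (what is proved, stated in full; the proofs are below) =====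
def Claim_equal_detect_tense : Prop := ∀ (simple_sentence_pos_tag : List String), Dom_detect_tense simple_sentence_pos_tag → Spec_detect_tense simple_sentence_pos_tag (detect_tense simple_sentence_pos_tag)

-- ===== LEMMAS AND PROOFS =====

-- ===== VERDICT (by name: the statement is the Claim_ definition above) =====
-- maximal rank of a list, default 1
def maxRank : List String → Int
  | [] => 1
  | t :: r => max (rankTag t) (maxRank r)

theorem fold_eq_maxRank : ∀ (l : List String) (m : Int), 1 ≤ m →
    l.foldl (fun m tag => let r := rankTag tag; if r > m then r else m) m = max m (maxRank l) := by
  intro l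
  induction l with
  | nil => intro m hm; simp [maxRank]; omega
  | cons t r ih =>
    intro m hm
    have h1 : (1:Int) ≤ max m (rankTag t) := le_max_of_le_left hm
    simp only [List.foldl, maxRank]
    have : (if rankTag t > m then rankTag t else m) = max m (rankTag t) := by
      split <;> omega
    rw [this, ih _ h1]
    omega

theorem loop1_eq : ∀ l : List String,
    detect_tense_loop1 l = if "MD" ∈ l then some "modal" else none := by
  intro l; induction l with
  | nil => simp [detect_tense_loop1]
  | cons t r ih =>
    by_cases h : t = "MD"
    · simp [detect_tense_loop1, h]
    · simp [detect_tense_loop1, h, Ne.symm h, ih]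

theorem loop2_eq : ∀ l : List String,
    detect_tense_loop2 l = if "VBD" ∈ l ∨ "VBN" ∈ l then some "past" else none := by
  intro l; induction l with
  | nil => simp [detect_tense_loop2]
  | cons t r ih =>
    by_cases h1 : t = "VBD"
    · simp [detect_tense_loop2, h1]
    · by_cases h2 : t = "VBN"
      · simp [detect_tense_loop2, h2]
      · simp [detect_tense_loop2, h1, h2, Ne.symm h1, Ne.symm h2, ih]

theorem maxRank_eq : ∀ l : List String,
    maxRank l = if "MD" ∈ l then 3 else if "VBD" ∈ l ∨ "VBN" ∈ l then 2 else 1 := by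
  intro l; induction l with
  | nil => simp [maxRank]
  | cons t r ih =>
    simp only [maxRank, ih, rankTag, List.mem_cons]
    by_cases h1 : t = "MD" <;> by_cases h2 : t = "VBD" <;> by_cases h3 : t = "VBN" <;>
      by_cases h4 : "MD" ∈ r <;> by_cases h5 : "VBD" ∈ r <;> by_cases h6 : "VBN" ∈ r <;>
      simp [h1, h2, h3, h4, h5, h6, Ne.symm, eq_comm]

theorem detect_tense_spec : Claim_equal_detect_tense := by
  unfold Claim_equal_detect_tense Spec_detect_tense
  intro l _
  unfold detect_tense detect_tense_alt
  rw [loop1_eq, loop2_eq, fold_eq_maxRank l 1 le_rfl, maxRank_eq]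
  by_cases h1 : "MD" ∈ l
  · simp [h1]
  · by_cases h2 : "VBD" ∈ l ∨ "VBN" ∈ l <;> simp [h1, h2]
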